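-- pv_equiv track=rewrite | github.com/bartek-filipiuk/repo-to-cat | config/mappings.py | get_language_background
-- ===== SOURCE A (Python) =====
-- from typing import Dict, Any
--
-- LANGUAGE_BACKGROUNDS: Dict[str, str] = {
--     # Popular languages (13)
--     "Python": "snakes and code snippets in a cozy den",
--     "JavaScript": "coffee cups and scattered npm packages on a laptop desk",
--     "TypeScript": "organized coffee cups with a blue bow tie and type annotations",
--     "Java": "coffee beans and enterprise office buildings with glass windows",
--     "C#": ".NET framework symbols and Windows logos on a modern workspace",
--     "C++": "circuit boards and low-level hardware with pointers and wires",
--     "C": "memory chips and pointer diagrams on vintage computer hardware",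
--     "Go": "gophers running playfully through scenic mountains",
--     "Rust": "gears, a friendly orange crab named Ferris, and metal safety equipment",
--     "PHP": "purple elephants and web servers with code scrolls",
--     "Ruby": "sparkling red gems scattered on polished railway tracks",
--     "Swift": "elegant bird feathers and sleek iOS devices in a modern studio",
--     "Kotlin": "friendly Android robots climbing colorful mountains",
--
--     # Less popular but still used (15)
--     "Perl": "wise camels carrying ancient scrolls through desert landscapes",
--     "Scala": "elegant marble staircases ascending toward JVM clouds",
--     "Haskell": "lambda symbols and complex mathematical equations on chalkboards",
--     "Elixir": "mystical potion bottles and alchemy symbols in a magical workshop",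
--     "Clojure": "colorful nested parentheses forming beautiful fractal patterns",
--     "Lua": "crescent moon and glowing stars in a peaceful night sky",
--     "R": "statistical graphs and colorful data charts on scientific displays",
--     "Dart": "delicate Flutter butterflies around vibrant mobile app screens",
--     "Shell": "terminal windows with green text on black screens",
--     "Bash": "command prompts and cascading shell scripts in a terminal",
--     "Objective-C": "classic Apple logos and legacy code blueprints from the past",
--     "F#": "functional programming pipes and .NET symbols in harmony",
--     "Erlang": "telephone switches and distributed network diagrams",
--     "Groovy": "musical notes and Gradle build scripts dancing together",
--     "Crystal": "sparkling crystal shards and high-performance gemstones",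
-- }
--
-- DEFAULT_BACKGROUND = "a generic code editor with colorful syntax highlighting and binary matrix"
--
-- def get_language_background(language: str) -> str:
--     """
--     Get the background theme for a programming language.
--
--     Performs case-insensitive lookup and returns a default background
--     for unknown languages.
--
--     Args:
--         language: Programming language name (e.g., "Python", "javascript")
--
--     Returns:
--         Background description string
--
--     Examples:
--         >>> get_language_background("Python")
--         'snakes and code snippets in a cozy den'
--         >>> get_language_background("PYTHON")
--         'snakes and code snippets in a cozy den'
--         >>> get_language_background("UnknownLang")
--         'a generic code editor with colorful syntax highlighting and binary matrix'
--     """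
--     # Handle None or empty language
--     if not language:
--         return DEFAULT_BACKGROUND
--
--     # Case-insensitive lookup
--     language_normalized = language.strip()
--
--     # Try exact match first
--     if language_normalized in LANGUAGE_BACKGROUNDS:
--         return LANGUAGE_BACKGROUNDS[language_normalized]
--
--     # Try case-insensitive match
--     for lang_key, background in LANGUAGE_BACKGROUNDS.items():
--         if lang_key.lower() == language_normalized.lower():
--             return background
--
--     # Return default for unknown languages
--     return DEFAULT_BACKGROUND
-- ===== SOURCE B (Python) =====
-- DEFAULT_BACKGROUND = "a generic code editor with colorful syntax highlighting and binary matrix"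
--
-- # The language table, normalized once: keys lowercased and the entries kept
-- # sorted by key, so each lookup is a single binary search instead of an
-- # exact-match branch plus a linear case-insensitive scan.
-- _SORTED_BACKGROUNDS = [
--     ("bash", "command prompts and cascading shell scripts in a terminal"),
--     ("c", "memory chips and pointer diagrams on vintage computer hardware"),
--     ("c#", ".NET framework symbols and Windows logos on a modern workspace"),
--     ("c++", "circuit boards and low-level hardware with pointers and wires"),
--     ("clojure", "colorful nested parentheses forming beautiful fractal patterns"),
--     ("crystal", "sparkling crystal shards and high-performance gemstones"),
--     ("dart", "delicate Flutter butterflies around vibrant mobile app screens"),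
--     ("elixir", "mystical potion bottles and alchemy symbols in a magical workshop"),
--     ("erlang", "telephone switches and distributed network diagrams"),
--     ("f#", "functional programming pipes and .NET symbols in harmony"),
--     ("go", "gophers running playfully through scenic mountains"),
--     ("groovy", "musical notes and Gradle build scripts dancing together"),
--     ("haskell", "lambda symbols and complex mathematical equations on chalkboards"),
--     ("java", "coffee beans and enterprise office buildings with glass windows"),
--     ("javascript", "coffee cups and scattered npm packages on a laptop desk"),
--     ("kotlin", "friendly Android robots climbing colorful mountains"),
--     ("lua", "crescent moon and glowing stars in a peaceful night sky"),
--     ("objective-c", "classic Apple logos and legacy code blueprints from the past"),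
--     ("perl", "wise camels carrying ancient scrolls through desert landscapes"),
--     ("php", "purple elephants and web servers with code scrolls"),
--     ("python", "snakes and code snippets in a cozy den"),
--     ("r", "statistical graphs and colorful data charts on scientific displays"),
--     ("ruby", "sparkling red gems scattered on polished railway tracks"),
--     ("rust", "gears, a friendly orange crab named Ferris, and metal safety equipment"),
--     ("scala", "elegant marble staircases ascending toward JVM clouds"),
--     ("shell", "terminal windows with green text on black screens"),
--     ("swift", "elegant bird feathers and sleek iOS devices in a modern studio"),
--     ("typescript", "organized coffee cups with a blue bow tie and type annotations"),
-- ]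
--
--
-- def get_language_background(language: str) -> str:
--     if not language:
--         return DEFAULT_BACKGROUND
--     target = language.strip().lower()
--     lo, hi = 0, len(_SORTED_BACKGROUNDS)
--     while lo < hi:
--         mid = (lo + hi) // 2
--         key, background = _SORTED_BACKGROUNDS[mid]
--         if key == target:
--             return background
--         if key < target:
--             lo = mid + 1
--         else:
--             hi = mid
--     return DEFAULT_BACKGROUND
-- ===== Notes on version B (the rewrite author's own statement) =====
-- stated objective: alternative
-- what changed: Replaced the exact-match branch plus per-call linear case-insensitive scan over the dict by a normalized table (lowercase keys, kept sorted by key) and a per-call binary search.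
import Mathlib
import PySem

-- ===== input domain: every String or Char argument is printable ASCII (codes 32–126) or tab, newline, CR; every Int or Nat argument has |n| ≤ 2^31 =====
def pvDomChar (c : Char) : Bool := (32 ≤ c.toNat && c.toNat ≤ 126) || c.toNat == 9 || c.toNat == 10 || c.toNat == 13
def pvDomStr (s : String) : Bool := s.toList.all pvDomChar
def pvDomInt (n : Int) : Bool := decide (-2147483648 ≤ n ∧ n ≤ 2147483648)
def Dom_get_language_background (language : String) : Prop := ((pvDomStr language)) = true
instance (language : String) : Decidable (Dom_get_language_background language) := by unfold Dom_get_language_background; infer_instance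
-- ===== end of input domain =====

-- B replaces A's exact-match branch plus per-call linear case-insensitive scan by a
-- lowercase-keyed table sorted once and a per-call binary search; return values are
-- proved identical on every input.

def pvDefault : String := "a generic code editor with colorful syntax highlighting and binary matrix"

-- ===== PORT A =====
-- the module-level dict LANGUAGE_BACKGROUNDS, in insertion order
def pvLangDict : PySem.Dict String String :=
  PySem.Dict.empty
    |>.insert "Python" "snakes and code snippets in a cozy den"
    |>.insert "JavaScript" "coffee cups and scattered npm packages on a laptop desk"
    |>.insert "TypeScript" "organized coffee cups with a blue bow tie and type annotations"
    |>.insert "Java" "coffee beans and enterprise office buildings with glass windows"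
    |>.insert "C#" ".NET framework symbols and Windows logos on a modern workspace"
    |>.insert "C++" "circuit boards and low-level hardware with pointers and wires"
    |>.insert "C" "memory chips and pointer diagrams on vintage computer hardware"
    |>.insert "Go" "gophers running playfully through scenic mountains"
    |>.insert "Rust" "gears, a friendly orange crab named Ferris, and metal safety equipment"
    |>.insert "PHP" "purple elephants and web servers with code scrolls"
    |>.insert "Ruby" "sparkling red gems scattered on polished railway tracks"
    |>.insert "Swift" "elegant bird feathers and sleek iOS devices in a modern studio"
    |>.insert "Kotlin" "friendly Android robots climbing colorful mountains"
    |>.insert "Perl" "wise camels carrying ancient scrolls through desert landscapes"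
    |>.insert "Scala" "elegant marble staircases ascending toward JVM clouds"
    |>.insert "Haskell" "lambda symbols and complex mathematical equations on chalkboards"
    |>.insert "Elixir" "mystical potion bottles and alchemy symbols in a magical workshop"
    |>.insert "Clojure" "colorful nested parentheses forming beautiful fractal patterns"
    |>.insert "Lua" "crescent moon and glowing stars in a peaceful night sky"
    |>.insert "R" "statistical graphs and colorful data charts on scientific displays"
    |>.insert "Dart" "delicate Flutter butterflies around vibrant mobile app screens"
    |>.insert "Shell" "terminal windows with green text on black screens"
    |>.insert "Bash" "command prompts and cascading shell scripts in a terminal"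
    |>.insert "Objective-C" "classic Apple logos and legacy code blueprints from the past"
    |>.insert "F#" "functional programming pipes and .NET symbols in harmony"
    |>.insert "Erlang" "telephone switches and distributed network diagrams"
    |>.insert "Groovy" "musical notes and Gradle build scripts dancing together"
    |>.insert "Crystal" "sparkling crystal shards and high-performance gemstones"

-- 'language_normalized in LANGUAGE_BACKGROUNDS' / '[language_normalized]' = Dict.get?;
-- the for-loop over .items() = first case-insensitive key match.
def get_language_background (language : String) : String :=
  if language == "" then pvDefault
  else
    let s := PySem.Str.strip language
    match pvLangDict.get? s with
    | some v => v
    | none =>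
      match pvLangDict.items.find? (fun p => PySem.Str.lower p.1 == PySem.Str.lower s) with
      | some p => p.2
      | none => pvDefault

-- ===== PORT B =====
-- Source B's module-level _SORTED_BACKGROUNDS literal: lowercase keys, sorted by key
def pvSortedBackgrounds : Array (String × String) := #[
  ("bash", "command prompts and cascading shell scripts in a terminal"),
  ("c", "memory chips and pointer diagrams on vintage computer hardware"),
  ("c#", ".NET framework symbols and Windows logos on a modern workspace"),
  ("c++", "circuit boards and low-level hardware with pointers and wires"),
  ("clojure", "colorful nested parentheses forming beautiful fractal patterns"),
  ("crystal", "sparkling crystal shards and high-performance gemstones"),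
  ("dart", "delicate Flutter butterflies around vibrant mobile app screens"),
  ("elixir", "mystical potion bottles and alchemy symbols in a magical workshop"),
  ("erlang", "telephone switches and distributed network diagrams"),
  ("f#", "functional programming pipes and .NET symbols in harmony"),
  ("go", "gophers running playfully through scenic mountains"),
  ("groovy", "musical notes and Gradle build scripts dancing together"),
  ("haskell", "lambda symbols and complex mathematical equations on chalkboards"),
  ("java", "coffee beans and enterprise office buildings with glass windows"),
  ("javascript", "coffee cups and scattered npm packages on a laptop desk"),
  ("kotlin", "friendly Android robots climbing colorful mountains"),
  ("lua", "crescent moon and glowing stars in a peaceful night sky"),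
  ("objective-c", "classic Apple logos and legacy code blueprints from the past"),
  ("perl", "wise camels carrying ancient scrolls through desert landscapes"),
  ("php", "purple elephants and web servers with code scrolls"),
  ("python", "snakes and code snippets in a cozy den"),
  ("r", "statistical graphs and colorful data charts on scientific displays"),
  ("ruby", "sparkling red gems scattered on polished railway tracks"),
  ("rust", "gears, a friendly orange crab named Ferris, and metal safety equipment"),
  ("scala", "elegant marble staircases ascending toward JVM clouds"),
  ("shell", "terminal windows with green text on black screens"),
  ("swift", "elegant bird feathers and sleek iOS devices in a modern studio"),
  ("typescript", "organized coffee cups with a blue bow tie and type annotations")]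

-- the while-loop of Source B; Python's 'key < target' on str is code-point lexicographic,
-- which on this ASCII domain is exactly '<' on the character lists
def pvBsearch (target : String) (lo hi : Nat) : Option String :=
  if h : lo < hi then
    let mid := (lo + hi) / 2
    let p := pvSortedBackgrounds.getD mid ("", "")
    if p.1 == target then some p.2
    else if p.1.toList < target.toList then pvBsearch target (mid + 1) hi
    else pvBsearch target lo mid
  else none
termination_by hi - lo
decreasing_by all_goals omega

def get_language_background_alt (language : String) : String :=
  if language == "" then pvDefault
  else
    match pvBsearch (PySem.Str.lower (PySem.Str.strip language)) 0 pvSortedBackgrounds.size with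
    | some bg => bg
    | none => pvDefault

-- ===== PRECONDITION & SPEC =====
def Spec_get_language_background (language : String) (out : String) : Prop := out = get_language_background_alt language
instance (language : String) (out : String) : Decidable (Spec_get_language_background language out) := by unfold Spec_get_language_background; infer_instance

-- ===== CLAIM (what is proved, stated in full; the proofs are below) =====
def Claim_equal_get_language_background : Prop := ∀ (language : String), Dom_get_language_background language → Spec_get_language_background language (get_language_background language)

-- ===== LEMMAS AND PROOFS =====

-- first match of an exact key, as Python's assoc lookup
def pvLookup (t : String) (M : List (String × String)) : Option String :=
  (M.find? (fun q => q.1 == t)).map (·.2)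

def pvSList : List (String × String) := pvSortedBackgrounds.toList

theorem pv_nodup_lowerA : (pvLangDict.items.map (fun p => PySem.Str.lower p.1)).Nodup := by decide

theorem pv_perm : (pvLangDict.items.map (fun p => (PySem.Str.lower p.1, p.2))).Perm pvSList := by decide

theorem pv_sorted : pvSList.Pairwise (fun p q => p.1.toList < q.1.toList) := by decide

theorem pv_nodup_S : (pvSList.map Prod.fst).Nodup := by decide

theorem pvLookup_eq_some_iff (t v : String) (M : List (String × String))
    (hnd : (M.map Prod.fst).Nodup) : pvLookup t M = some v ↔ (t, v) ∈ M := by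
  unfold pvLookup
  constructor
  · intro h
    rcases Option.map_eq_some_iff.mp h with ⟨q, hq, hv⟩
    have hqt : q.1 = t := by simpa using List.find?_some hq
    have : q = (t, v) := by cases q; simp_all
    exact this ▸ List.mem_of_find?_eq_some hq
  · intro hm
    have hpred : (fun q : String × String => q.1 == t) (t, v) = true := by simp
    cases hf : M.find? (fun q => q.1 == t) with
    | none => exact absurd hpred (by simpa using List.find?_eq_none.mp hf (t, v) hm)
    | some q =>
      have hqt : q.1 = t := by simpa using List.find?_some hf
      have hqm : q ∈ M := List.mem_of_find?_eq_some hf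
      have : q = (t, v) := List.inj_on_of_nodup_map hnd hqm hm (by simp [hqt])
      simp [this]

theorem pvLookup_eq_none_iff (t : String) (M : List (String × String)) :
    pvLookup t M = none ↔ ∀ p ∈ M, p.1 ≠ t := by
  unfold pvLookup
  simp [List.find?_eq_none]

theorem pvLookup_perm (t : String) (M N : List (String × String)) (h : M.Perm N)
    (hnd : (M.map Prod.fst).Nodup) : pvLookup t M = pvLookup t N := by
  have hndN : (N.map Prod.fst).Nodup := ((h.map Prod.fst).nodup_iff).mp hnd
  cases hM : pvLookup t M with
  | none =>
    cases hN : pvLookup t N with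
    | none => rfl
    | some v =>
      have := (pvLookup_eq_some_iff t v N hndN).mp hN
      have := (pvLookup_eq_none_iff t M).mp hM (t, v) (h.mem_iff.mpr this)
      simp at this
  | some v =>
    have := (pvLookup_eq_some_iff t v M hnd).mp hM
    exact ((pvLookup_eq_some_iff t v N hndN).mpr (h.mem_iff.mp this)).symm ▸ rfl

-- A's two branches collapse to one lowered first-match lookup
theorem pvA_eq (language : String) (h : ¬ (language == "") = true) :
    get_language_background language
      = (pvLookup (PySem.Str.lower (PySem.Str.strip language))
          (pvLangDict.items.map (fun p => (PySem.Str.lower p.1, p.2)))).getD pvDefault := by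
  have hnd : ((pvLangDict.items.map (fun p => (PySem.Str.lower p.1, p.2))).map Prod.fst).Nodup := by
    simpa [List.map_map, Function.comp] using pv_nodup_lowerA
  unfold get_language_background
  rw [if_neg h]
  cases hg : pvLangDict.get? (PySem.Str.strip language) with
  | some v =>
    have hm : (PySem.Str.strip language, v) ∈ pvLangDict.items :=
      PySem.Dict.mem_items_of_get?_eq_some _ hg
    have hml : (PySem.Str.lower (PySem.Str.strip language), v)
        ∈ pvLangDict.items.map (fun p => (PySem.Str.lower p.1, p.2)) :=
      List.mem_map.mpr ⟨(PySem.Str.strip language, v), hm, rfl⟩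
    have hlv := (pvLookup_eq_some_iff _ v _ hnd).mpr hml
    simp only [hg, hlv, Option.getD_some]
  | none =>
    have hfm : pvLookup (PySem.Str.lower (PySem.Str.strip language))
          (pvLangDict.items.map (fun p => (PySem.Str.lower p.1, p.2)))
        = (pvLangDict.items.find?
            (fun p => PySem.Str.lower p.1 == PySem.Str.lower (PySem.Str.strip language))).map (·.2) := by
      unfold pvLookup
      rw [List.find?_map]
      simp [Function.comp_def]
    rw [hfm]
    simp only [hg]
    cases hf : pvLangDict.items.find?
        (fun p => PySem.Str.lower p.1 == PySem.Str.lower (PySem.Str.strip language)) <;> simp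

-- binary search: miss and hit
theorem pvBsearch_none (t : String) (lo hi : Nat)
    (habs : ∀ i, lo ≤ i → i < hi → ((pvSortedBackgrounds.getD i ("", "")).1 ≠ t)) :
    pvBsearch t lo hi = none := by
  fun_induction pvBsearch t lo hi with
  | case1 lo hi h mid p heq =>
    exact absurd (beq_iff_eq.mp heq) (habs mid (by omega) (by omega))
  | case2 lo hi h mid p hne hlt ih =>
    exact ih (fun i h1 h2 => habs i (by omega) h2)
  | case3 lo hi h mid p hne hge ih =>
    exact ih (fun i h1 h2 => habs i h1 (by omega))
  | case4 lo hi h => rfl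

theorem pv_getD_eq (i : Nat) (h : i < pvSortedBackgrounds.size) :
    pvSortedBackgrounds.getD i ("", "") = pvSList[i]'(by simpa [pvSList] using h) := by
  simp [pvSList, Array.getD, h]

theorem pv_sorted_idx (i j : Nat) (hij : i < j) (hj : j < pvSortedBackgrounds.size) :
    (pvSortedBackgrounds.getD i ("", "")).1.toList
      < (pvSortedBackgrounds.getD j ("", "")).1.toList := by
  rw [pv_getD_eq i (lt_trans hij hj), pv_getD_eq j hj]
  exact List.pairwise_iff_getElem.mp pv_sorted i j _ _ hij

theorem pvBsearch_some (t : String) (lo hi : Nat) (hhi : hi ≤ pvSortedBackgrounds.size)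
    (hex : ∃ i, lo ≤ i ∧ i < hi ∧ (pvSortedBackgrounds.getD i ("", "")).1 = t) :
    ∃ i, lo ≤ i ∧ i < hi ∧ (pvSortedBackgrounds.getD i ("", "")).1 = t ∧
      pvBsearch t lo hi = some (pvSortedBackgrounds.getD i ("", "")).2 := by
  fun_induction pvBsearch t lo hi with
  | case1 lo hi h mid p heq =>
    exact ⟨mid, by omega, by omega, beq_iff_eq.mp heq, rfl⟩
  | case2 lo hi h mid p hne hlt ih =>
    obtain ⟨i, h1, h2, hk⟩ := hex
    have hne' : (pvSortedBackgrounds.getD mid ("", "")).1 ≠ t := fun he => hne (beq_iff_eq.mpr he)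
    have hi_gt : mid < i := by
      rcases Nat.lt_trichotomy i mid with hc | hc | hc
      · exact absurd (hk ▸ lt_trans (pv_sorted_idx i mid hc (by omega)) hlt)
          (lt_irrefl _)
      · exact absurd (hc ▸ hk) hne'
      · exact hc
    obtain ⟨j, j1, j2, j3, j4⟩ := ih hhi ⟨i, by omega, h2, hk⟩
    exact ⟨j, by omega, j2, j3, j4⟩
  | case3 lo hi h mid p hne hge ih =>
    obtain ⟨i, h1, h2, hk⟩ := hex
    have hne' : (pvSortedBackgrounds.getD mid ("", "")).1 ≠ t := fun he => hne (beq_iff_eq.mpr he)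
    have hgt : t.toList < (pvSortedBackgrounds.getD mid ("", "")).1.toList := by
      rcases lt_trichotomy ((pvSortedBackgrounds.getD mid ("", "")).1.toList) t.toList
        with hc | hc | hc
      · exact absurd hc hge
      · exact absurd (String.toList_inj.mp hc) hne'
      · exact hc
    have hi_lt : i < mid := by
      rcases Nat.lt_trichotomy i mid with hc | hc | hc
      · exact hc
      · exact absurd (hc ▸ hk) hne'
      · exact absurd (hk ▸ lt_trans hgt (pv_sorted_idx mid i hc (by omega)))
          (lt_irrefl _)
    obtain ⟨j, j1, j2, j3, j4⟩ := ih (by omega) ⟨i, h1, by omega, hk⟩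
    exact ⟨j, j1, by omega, j3, j4⟩
  | case4 lo hi h =>
    obtain ⟨i, h1, h2, _⟩ := hex
    omega

theorem pvB_eq (t : String) : pvBsearch t 0 pvSortedBackgrounds.size = pvLookup t pvSList := by
  by_cases hex : ∃ i, i < pvSortedBackgrounds.size ∧ (pvSortedBackgrounds.getD i ("", "")).1 = t
  · obtain ⟨i, hi, hk⟩ := hex
    obtain ⟨j, _, j2, j3, j4⟩ := pvBsearch_some t 0 pvSortedBackgrounds.size (le_refl _)
      ⟨i, Nat.zero_le _, hi, hk⟩
    have hjl : j < pvSList.length := by simpa [pvSList] using j2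
    have hmem : (t, (pvSortedBackgrounds.getD j ("", "")).2) ∈ pvSList := by
      have hpj : pvSList[j] = (t, (pvSortedBackgrounds.getD j ("", "")).2) := by
        rw [← pv_getD_eq j j2]
        exact Prod.ext j3 rfl
      exact hpj ▸ List.getElem_mem hjl
    rw [j4, ((pvLookup_eq_some_iff _ _ _ pv_nodup_S).mpr hmem)]
  · push Not at hex
    rw [pvBsearch_none t 0 pvSortedBackgrounds.size (fun i _ h2 => hex i h2),
      (pvLookup_eq_none_iff t pvSList).mpr]
    intro p hp
    obtain ⟨k, hk, hpk⟩ := List.mem_iff_getElem.mp hp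
    have hk' : k < pvSortedBackgrounds.size := by simpa [pvSList] using hk
    have := hex k hk'
    rw [pv_getD_eq k hk'] at this
    exact fun he => this (by simp [hpk, he])

-- ===== VERDICT (by name: the statement is the Claim_ definition above) =====
theorem get_language_background_spec : Claim_equal_get_language_background := by
  intro language _
  unfold Spec_get_language_background
  by_cases h : (language == "") = true
  · unfold get_language_background get_language_background_alt
    rw [if_pos h, if_pos h]
  · rw [pvA_eq language h]
    unfold get_language_background_alt
    rw [if_neg h, pvB_eq, pvLookup_perm _ _ _ pv_perm (by
      have := pv_nodup_lowerA
      simpa [List.map_map, Function.comp] using this)]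
    cases pvLookup (PySem.Str.lower (PySem.Str.strip language)) pvSList <;> simp [Option.getD]
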